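-- pv_equiv track=rewrite | github.com/Domusgpt/crystal-grimoire-v3-production | backend_server.py | calculate_name_numerology_number
-- ===== SOURCE A (Python) =====
-- NUMEROLOGY_LETTER_VALUES = {
--     'a': 1, 'b': 2, 'c': 3, 'd': 4, 'e': 5, 'f': 6, 'g': 7, 'h': 8, 'i': 9,
--     'j': 1, 'k': 2, 'l': 3, 'm': 4, 'n': 5, 'o': 6, 'p': 7, 'q': 8, 'r': 9,
--     's': 1, 't': 2, 'u': 3, 'v': 4, 'w': 5, 'x': 6, 'y': 7, 'z': 8
-- }
--
-- def calculate_name_numerology_number(name: str) -> int: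
--     if not name or not isinstance(name, str):
--         return 0
--
--     name_lower = name.lower()
--     total = 0
--     for char in name_lower:
--         total += NUMEROLOGY_LETTER_VALUES.get(char, 0)
--
--     # Reduce to single digit (1-9), unless it's a master number 11, 22, 33 (though the spec only shows 1-9 reduction)
--     # The example "AMETHYST = 30 = 3+0 = 3" suggests simple reduction.
--     # For "sum all digits" and "reduce to single digit":
--     while total > 9:
--         s = str(total)
--         total = sum(int(digit) for digit in s)
--         # Handle cases like 19 -> 10 -> 1, ensure it fully reduces if intermediate sum is > 9
--         if total <=9: # if fully reduced, break
--             break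
--         # if total is 11, 22, 33, it could be a master number, but the spec says reduce to 1-9
--         # and example shows 30 -> 3. So, we continue reducing.
--     return total if total != 0 else 0 # Return 0 if name was empty or invalid chars only
-- ===== SOURCE B (Python) =====
-- def calculate_name_numerology_number(name: str) -> int:
--     # Single pass keeping only the running residue mod 9 (the digital root),
--     # with the letter value computed arithmetically instead of a table lookup:
--     # for a..z the Pythagorean value is (ord(ch) - ord('a')) % 9 + 1.
--     r = 0
--     seen = False
--     for ch in name.lower():
--         if 'a' <= ch <= 'z':
--             r = (r + (ord(ch) - 97) % 9 + 1) % 9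
--             seen = True
--     return 9 if seen and r == 0 else r
-- ===== Notes on version B (the rewrite author's own statement) =====
-- stated objective: alternative
-- what changed: B drops the letter-value dict and the repeated str()-digit-sum while-loop: it makes one pass keeping only the running residue mod 9 (the digital root), computing each letter value arithmetically as (ord(ch)-97)%9+1, and returns 9 when a letter was seen and the residue is 0.
import Mathlib
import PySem

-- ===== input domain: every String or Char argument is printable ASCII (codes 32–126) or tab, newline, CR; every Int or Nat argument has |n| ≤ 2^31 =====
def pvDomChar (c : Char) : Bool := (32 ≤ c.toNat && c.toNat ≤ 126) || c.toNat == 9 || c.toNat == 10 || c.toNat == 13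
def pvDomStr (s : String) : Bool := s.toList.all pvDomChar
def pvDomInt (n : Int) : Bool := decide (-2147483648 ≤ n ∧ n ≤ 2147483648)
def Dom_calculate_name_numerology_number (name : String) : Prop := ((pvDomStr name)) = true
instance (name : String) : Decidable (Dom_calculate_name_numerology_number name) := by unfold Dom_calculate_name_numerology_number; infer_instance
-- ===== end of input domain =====

-- B drops the letter-value dict and the repeated str()-digit-sum while-loop: one pass keeping
-- only the running residue mod 9, letter values computed as (ord(ch)-97)%9+1; objective: alternative.

-- ===== PORT A =====

-- the module constant NUMEROLOGY_LETTER_VALUES (used by A only)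
def NUMEROLOGY_LETTER_VALUES : PySem.Dict Char Int := PySem.Dict.ofList
  [('a',1),('b',2),('c',3),('d',4),('e',5),('f',6),('g',7),('h',8),('i',9),
   ('j',1),('k',2),('l',3),('m',4),('n',5),('o',6),('p',7),('q',8),('r',9),
   ('s',1),('t',2),('u',3),('v',4),('w',5),('x',6),('y',7),('z',8)]

-- sum(int(digit) for digit in str(total)); int(digit) is ported with .getD 0 because the
-- ValueError branch is unreachable: this is only applied to total > 9, whose str() is all digits
def pyDigitSum (total : Int) : Int :=
  (PySem.Int.toChars total).foldl
    (fun acc digit => acc + (PySem.Int.ofChars? [digit]).getD 0) 0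

-- termination helpers for the while-loop (cited by numerologyReduce's decreasing_by)
theorem ofChars?_digitChar (d : ℕ) (hd : d < 10) :
    (PySem.Int.ofChars? [Nat.digitChar d]).getD 0 = (d : Int) := by
  interval_cases d <;> decide

theorem foldl_add_map (g : Char → Int) (l : List Char) (a : Int) :
    l.foldl (fun acc c => acc + g c) a = a + (l.map g).sum := by
  induction l generalizing a with
  | nil => simp
  | cons c l ih => simp only [List.foldl_cons, List.map_cons, List.sum_cons, ih]; ring

theorem toDigits_map_sum (n : ℕ) :
    ((Nat.toDigits 10 n).map (fun d => (PySem.Int.ofChars? [d]).getD 0)).sum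
      = ((Nat.digits 10 n).sum : Int) := by
  induction n using Nat.strong_induction_on with
  | _ n ih =>
    by_cases h : n < 10
    · rw [Nat.toDigits_of_lt_base h]
      by_cases h0 : n = 0
      · subst h0; simp [ofChars?_digitChar 0 (by norm_num)]
      · rw [Nat.digits_def' (by norm_num : (1:ℕ) < 10) (Nat.pos_of_ne_zero h0)]
        have hd : n / 10 = 0 := Nat.div_eq_of_lt h
        simp [ofChars?_digitChar n h, hd, Nat.mod_eq_of_lt h]
    · rw [Nat.toDigits_eq_if (by norm_num : (1:ℕ) < 10), if_neg h,
          Nat.digits_def' (by norm_num : (1:ℕ) < 10) (by omega : 0 < n)]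
      have hlt : n / 10 < n := Nat.div_lt_self (by omega) (by norm_num)
      simp only [List.map_append, List.sum_append, List.map_cons, List.map_nil,
        List.sum_cons, List.sum_nil, ih _ hlt,
        ofChars?_digitChar (n % 10) (Nat.mod_lt _ (by norm_num))]
      push_cast; ring

theorem pyDigitSum_eq (t : Int) (ht : 0 ≤ t) :
    pyDigitSum t = ((Nat.digits 10 t.toNat).sum : Int) := by
  unfold pyDigitSum PySem.Int.toChars
  rw [if_neg (by omega), foldl_add_map, toDigits_map_sum]
  ring

theorem digits_sum_lt (n : ℕ) (h : 10 ≤ n) : (Nat.digits 10 n).sum < n := by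
  rw [Nat.digits_def' (by norm_num : (1:ℕ) < 10) (by omega)]
  have h1 := Nat.digit_sum_le 10 (n / 10)
  simp only [List.sum_cons]; omega

theorem pyDigitSum_lt (t : Int) (h : 9 < t) : (pyDigitSum t).toNat < t.toNat := by
  rw [pyDigitSum_eq t (by omega)]
  have := digits_sum_lt t.toNat (by omega)
  omega

-- the 'while total > 9' loop of A, with A's redundant 'if total <= 9: break' kept
def numerologyReduce (total : Int) : Int :=
  if h : 9 < total then
    let total' := pyDigitSum total
    if total' ≤ 9 then total'
    else numerologyReduce total'
  else total
termination_by total.toNat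
decreasing_by exact pyDigitSum_lt total h

def calculate_name_numerology_number (name : String) : Int :=
  if name = "" then 0
  else
    let name_lower := PySem.Str.lower name
    let total := name_lower.toList.foldl
      (fun total char => total + NUMEROLOGY_LETTER_VALUES.getD char 0) 0
    let total := numerologyReduce total
    if total ≠ 0 then total else 0

-- ===== PORT B =====
-- one pass over name.lower(); state = (running residue mod 9, whether a letter was seen)
def calculate_name_numerology_number_alt (name : String) : Int :=
  let st := (PySem.Str.lower name).toList.foldl
    (fun (st : Int × Bool) ch =>
      if 'a' ≤ ch ∧ ch ≤ 'z' then
        (PySem.Int.mod (st.1 + PySem.Int.mod ((ch.toNat : Int) - 97) 9 + 1) 9, true)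
      else st)
    (0, false)
  if st.2 = true ∧ st.1 = 0 then 9 else st.1

-- ===== PRECONDITION & SPEC =====
def Spec_calculate_name_numerology_number (name : String) (out : Int) : Prop := out = calculate_name_numerology_number_alt name
instance (name : String) (out : Int) : Decidable (Spec_calculate_name_numerology_number name out) := by unfold Spec_calculate_name_numerology_number; infer_instance

-- ===== CLAIM (what is proved, stated in full; the proofs are below) =====
def Claim_equal_calculate_name_numerology_number : Prop := ∀ (name : String), Dom_calculate_name_numerology_number name → Spec_calculate_name_numerology_number name (calculate_name_numerology_number name)

-- ===== LEMMAS AND PROOFS =====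

-- A's dict value as B's arithmetic formula, for domain chars (checked once over all 127 codes)
set_option maxRecDepth 4096 in
theorem dict_formula (c : Char) (hc : pvDomChar c = true) :
    NUMEROLOGY_LETTER_VALUES.getD c 0 =
      (if 'a' ≤ c ∧ c ≤ 'z' then ((c.toNat : Int) - 97) % 9 + 1 else 0) := by
  have hlt : c.toNat < 127 := by
    simp only [pvDomChar, Bool.or_eq_true, Bool.and_eq_true, decide_eq_true_eq, beq_iff_eq] at hc
    omega
  have h : ∀ n : Fin 127,
      (NUMEROLOGY_LETTER_VALUES.getD (Char.ofNat n.val) 0 ==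
        (if 'a' ≤ Char.ofNat n.val ∧ Char.ofNat n.val ≤ 'z'
         then (((Char.ofNat n.val).toNat : Int) - 97) % 9 + 1 else 0)) = true := by decide
  have := h ⟨c.toNat, hlt⟩
  rw [Char.ofNat_toNat] at this
  exact eq_of_beq this

theorem lowerChar_dom (c : Char) (hc : pvDomChar c = true) :
    pvDomChar (PySem.Chars.lowerChar c) = true := by
  have hlt : c.toNat < 127 := by
    simp only [pvDomChar, Bool.or_eq_true, Bool.and_eq_true, decide_eq_true_eq, beq_iff_eq] at hc
    omega
  have h : ∀ n : Fin 127,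
      pvDomChar (Char.ofNat n.val) = true → pvDomChar (PySem.Chars.lowerChar (Char.ofNat n.val)) = true := by
    decide
  have := h ⟨c.toNat, hlt⟩
  rw [Char.ofNat_toNat] at this
  exact this hc

-- abbreviations used only by the proofs
def pvVal (c : Char) : Int := NUMEROLOGY_LETTER_VALUES.getD c 0
def pvIsLetter (c : Char) : Bool := decide ('a' ≤ c ∧ c ≤ 'z')
def pvStep (st : Int × Bool) (ch : Char) : Int × Bool :=
  if 'a' ≤ ch ∧ ch ≤ 'z' then
    (PySem.Int.mod (st.1 + PySem.Int.mod ((ch.toNat : Int) - 97) 9 + 1) 9, true)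
  else st

theorem sum_bounds (l : List Char) (hd : l.all pvDomChar = true) :
    0 ≤ (l.map pvVal).sum ∧ (0 < (l.map pvVal).sum ↔ l.any pvIsLetter = true) := by
  induction l with
  | nil => simp
  | cons c l ih =>
    simp only [List.all_cons, Bool.and_eq_true] at hd
    obtain ⟨hc, hl⟩ := hd
    obtain ⟨ih1, ih2⟩ := ih hl
    simp only [List.map_cons, List.sum_cons, List.any_cons, Bool.or_eq_true]
    rw [pvVal, dict_formula c hc]
    by_cases hcl : 'a' ≤ c ∧ c ≤ 'z'
    · have h9 : 0 ≤ ((c.toNat : Int) - 97) % 9 := Int.emod_nonneg _ (by norm_num)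
      rw [if_pos hcl]
      constructor
      · omega
      · constructor
        · intro _; left; simpa [pvIsLetter] using hcl
        · intro _; omega
    · rw [if_neg hcl]
      constructor
      · omega
      · rw [zero_add, ih2]
        constructor
        · intro h; right; exact h
        · rintro (h | h)
          · exact absurd (of_decide_eq_true h) hcl
          · exact h

theorem fold_inv (l : List Char) (r : Int) (seen : Bool)
    (hd : l.all pvDomChar = true) (h0 : 0 ≤ r) (h9 : r < 9) :
    l.foldl pvStep (r, seen) = ((r + (l.map pvVal).sum) % 9, seen || l.any pvIsLetter) := by
  induction l generalizing r seen with
  | nil =>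
    simp only [List.foldl_nil, List.map_nil, List.sum_nil, List.any_nil, Bool.or_false, add_zero]
    rw [Int.emod_eq_of_lt h0 h9]
  | cons c l ih =>
    simp only [List.all_cons, Bool.and_eq_true] at hd
    obtain ⟨hc, hl⟩ := hd
    simp only [List.foldl_cons, List.map_cons, List.sum_cons, List.any_cons]
    by_cases hcl : 'a' ≤ c ∧ c ≤ 'z'
    · have hv : pvVal c = ((c.toNat : Int) - 97) % 9 + 1 := by
        rw [pvVal, dict_formula c hc, if_pos hcl]
      have hmod : ∀ a : Int, PySem.Int.mod a 9 = a % 9 :=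
        fun a => PySem.Int.mod_eq_emod_of_pos (by norm_num)
      have hr' : 0 ≤ (r + ((c.toNat : Int) - 97) % 9 + 1) % 9 ∧
          (r + ((c.toNat : Int) - 97) % 9 + 1) % 9 < 9 :=
        ⟨Int.emod_nonneg _ (by norm_num), Int.emod_lt_of_pos _ (by norm_num)⟩
      rw [show l.foldl pvStep (pvStep (r, seen) c) =
            l.foldl pvStep ((r + ((c.toNat : Int) - 97) % 9 + 1) % 9, true) by
          simp only [pvStep, if_pos hcl, hmod],
        ih _ _ hl hr'.1 hr'.2, hv]
      have hlet : pvIsLetter c = true := by simpa [pvIsLetter] using hcl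
      rw [hlet]
      simp only [Bool.true_or, Bool.or_true]
      have hmm : ((r + ((c.toNat : Int) - 97) % 9 + 1) % 9 + (l.map pvVal).sum) % 9
          = (r + (((c.toNat : Int) - 97) % 9 + 1 + (l.map pvVal).sum)) % 9 := by
        rw [Int.emod_add_emod]; congr 1; ring
      rw [hmm]
    · have hv : pvVal c = 0 := by rw [pvVal, dict_formula c hc, if_neg hcl]
      have hlet : pvIsLetter c = false := by simpa [pvIsLetter] using hcl
      rw [show pvStep (r, seen) c = (r, seen) by simp only [pvStep, if_neg hcl],
        ih _ _ hl h0 h9, hv, hlet]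
      simp

theorem digits_sum_pos : ∀ n : ℕ, 0 < n → 0 < (Nat.digits 10 n).sum := by
  intro n
  induction n using Nat.strong_induction_on with
  | _ n ih =>
    intro h
    rw [Nat.digits_def' (by norm_num : (1:ℕ) < 10) h]
    by_cases hm : n % 10 = 0
    · have hq : 0 < n / 10 := by omega
      have := ih (n / 10) (Nat.div_lt_self h (by norm_num)) hq
      simp only [List.sum_cons]; omega
    · simp only [List.sum_cons]; omega

-- the 'numerologyReduce = closed-form digital root' characterisation
theorem numerologyReduce_eq_aux : ∀ (n : ℕ) (t : Int), t.toNat = n → 0 ≤ t →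
    numerologyReduce t = if t = 0 then 0 else 1 + (t - 1) % 9 := by
  intro n
  induction n using Nat.strong_induction_on with
  | _ n ih =>
    intro t hn ht
    rw [numerologyReduce]
    by_cases h9 : 9 < t
    · rw [dif_pos h9]
      have hs : pyDigitSum t = ((Nat.digits 10 t.toNat).sum : Int) := pyDigitSum_eq t ht
      have hpos : 0 < (Nat.digits 10 t.toNat).sum := digits_sum_pos t.toNat (by omega)
      have hlt : (pyDigitSum t).toNat < t.toNat := pyDigitSum_lt t h9
      have hmod : t.toNat % 9 = (Nat.digits 10 t.toNat).sum % 9 := Nat.modEq_nine_digits_sum t.toNat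
      rw [if_neg (by omega : ¬ t = 0)]
      show (if pyDigitSum t ≤ 9 then pyDigitSum t else numerologyReduce (pyDigitSum t)) = _
      by_cases hs9 : pyDigitSum t ≤ 9
      · rw [if_pos hs9]
        rw [hs] at hs9 ⊢
        omega
      · rw [if_neg hs9,
            ih (pyDigitSum t).toNat (by omega) (pyDigitSum t) rfl (by rw [hs]; positivity),
            if_neg (by rw [hs]; omega : ¬ pyDigitSum t = 0)]
        rw [hs]
        omega
    · rw [dif_neg h9]
      split_ifs with h0
      · omega
      · omega

-- ===== VERDICT (by name: the statement is the Claim_ definition above) =====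
theorem calculate_name_numerology_number_spec : Claim_equal_calculate_name_numerology_number := by
  unfold Claim_equal_calculate_name_numerology_number Spec_calculate_name_numerology_number
  intro name hdom
  by_cases hname : name = ""
  · subst hname; decide
  · unfold calculate_name_numerology_number calculate_name_numerology_number_alt
    rw [if_neg hname]
    set l := (PySem.Str.lower name).toList with hl
    have hdl : l.all pvDomChar = true := by
      have : l = name.toList.map PySem.Chars.lowerChar := by
        simp [hl, PySem.Str.lower, PySem.Chars.lower]
      rw [this, List.all_map]
      unfold Dom_calculate_name_numerology_number pvDomStr at hdom
      exact List.all_eq_true.mpr fun c hc =>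
        lowerChar_dom c (List.all_eq_true.mp hdom c hc)
    have hfoldA : l.foldl (fun total char => total + NUMEROLOGY_LETTER_VALUES.getD char 0) 0
        = (l.map pvVal).sum := by
      rw [foldl_add_map, zero_add]; rfl
    have hfoldB : l.foldl (fun (st : Int × Bool) ch =>
          if 'a' ≤ ch ∧ ch ≤ 'z' then
            (PySem.Int.mod (st.1 + PySem.Int.mod ((ch.toNat : Int) - 97) 9 + 1) 9, true)
          else st) (0, false)
        = ((0 + (l.map pvVal).sum) % 9, false || l.any pvIsLetter) := by
      exact fold_inv l 0 false hdl (by norm_num) (by norm_num)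
    set T := (l.map pvVal).sum with hT
    obtain ⟨hTnn, hTpos⟩ := sum_bounds l hdl
    have hnr : numerologyReduce T = if T = 0 then 0 else 1 + (T - 1) % 9 :=
      numerologyReduce_eq_aux T.toNat T rfl hTnn
    show (let total := numerologyReduce (l.foldl _ 0); if total ≠ 0 then total else 0)
        = (let st := l.foldl _ (0, false); if st.2 = true ∧ st.1 = 0 then 9 else st.1)
    rw [hfoldA, hfoldB, hnr]
    simp only [Bool.false_or, zero_add]
    by_cases hany : l.any pvIsLetter = true
    · have hpos : 0 < T := hTpos.mpr hany
      rw [if_neg (by omega : ¬ T = 0), hany]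
      have hm1 : 0 ≤ (T - 1) % 9 ∧ (T - 1) % 9 < 9 :=
        ⟨Int.emod_nonneg _ (by norm_num), Int.emod_lt_of_pos _ (by norm_num)⟩
      have hm2 : 0 ≤ T % 9 ∧ T % 9 < 9 :=
        ⟨Int.emod_nonneg _ (by norm_num), Int.emod_lt_of_pos _ (by norm_num)⟩
      rw [if_pos (by omega : ¬ (1 + (T - 1) % 9) = 0)]
      by_cases h9 : T % 9 = 0
      · rw [if_pos ⟨rfl, h9⟩]; omega
      · rw [if_neg (by simp [h9])]; omega
    · have hT0 : T = 0 := by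
        have hnp : ¬ 0 < T := fun h => hany (hTpos.mp h)
        omega
      rw [if_pos hT0]
      rw [Bool.not_eq_true] at hany
      rw [hany]
      simp only [Bool.false_eq_true, false_and, if_false]
      omega
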